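-- pv_equiv track=rewrite | github.com/InfantLab/TRACX-Python | tracxMusic.py | get_sequence_frequencies
-- ===== SOURCE A (Python) =====
-- def get_sequence_frequencies(music, length = 1):
--     '''
--     takes some music as a single list and sequence length and returns a
--     dictionary of all the sequences of given length and their frequency of
--     occurance.
--     '''
--     all_seqs  = set()
--     len_music = len(music)
--     for i in range(0,len_music - length):
--         # NB sets don't work on lists so convert to tuple
--         all_seqs.add(tuple(music[i:i+length]))
--     all_freqs = {}
--     for seq in all_seqs:
--         all_freqs[seq] = 0
--         for i in range(0,len_music - length):
--             if seq == tuple(music[i:i+length]):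
--                 all_freqs[seq] += 1
--     return all_freqs
-- ===== SOURCE B (Python) =====
-- def get_sequence_frequencies(music, length = 1):
--     '''
--     takes some music as a single list and sequence length and returns a
--     dictionary of all the sequences of given length and their frequency of
--     occurance.
--     '''
--     all_freqs = {}
--     for i in range(0, len(music) - length):
--         t = tuple(music[i:i+length])
--         all_freqs[t] = all_freqs.get(t, 0) + 1
--     return all_freqs
-- ===== Notes on version B (the rewrite author's own statement) =====
-- stated objective: simpler
-- what changed: One counting pass that increments a dict entry per window, replacing A's two-phase build-a-set-of-windows then rescan-all-windows-once-per-distinct-window structure.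
import Mathlib
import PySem

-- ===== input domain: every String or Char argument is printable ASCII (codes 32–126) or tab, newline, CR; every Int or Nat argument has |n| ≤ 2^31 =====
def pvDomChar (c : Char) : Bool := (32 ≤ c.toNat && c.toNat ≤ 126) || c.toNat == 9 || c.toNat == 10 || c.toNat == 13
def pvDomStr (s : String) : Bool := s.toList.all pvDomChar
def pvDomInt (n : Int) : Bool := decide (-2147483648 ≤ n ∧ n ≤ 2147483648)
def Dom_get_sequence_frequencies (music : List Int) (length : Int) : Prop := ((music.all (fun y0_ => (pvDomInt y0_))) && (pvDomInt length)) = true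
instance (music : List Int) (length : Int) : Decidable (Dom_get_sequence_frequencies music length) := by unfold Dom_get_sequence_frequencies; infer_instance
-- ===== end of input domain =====

-- B replaces A's build-set-then-rescan-per-distinct-window structure by one counting pass.
-- NOTE: Python A returns the dict in set-iteration (hash) order; dict outputs are compared
-- as association lists ignoring order, and both ports use first-occurrence order.

-- ===== PORT A =====
-- A: phase 1 collects the distinct windows into a set; phase 2, for each distinct window,
-- rescans all windows and counts matches.
def get_sequence_frequencies (music : List Int) (length : Int) : List (List Int × Int) :=
  let len_music : Int := music.length
  let all_seqs : PySem.Set (List Int) :=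
    (PySem.List.pyRange 0 (len_music - length) 1).foldl
      (fun s i => PySem.Set.add s (PySem.List.slice music (some i) (some (i + length))))
      PySem.Set.empty
  let all_freqs : PySem.Dict (List Int) Int :=
    all_seqs.foldl
      (fun d seq =>
        (PySem.List.pyRange 0 (len_music - length) 1).foldl
          (fun d i =>
            if seq == PySem.List.slice music (some i) (some (i + length)) then
              PySem.Dict.modify d seq 0 (· + 1)   -- all_freqs[seq] += 1 (key present, set to 0 just before)
            else d)
          (PySem.Dict.insert d seq 0))
      PySem.Dict.empty
  all_freqs.items

-- ===== PORT B =====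
-- B: a single pass; each window increments its own dict entry.
def get_sequence_frequencies_alt (music : List Int) (length : Int) : List (List Int × Int) :=
  let all_freqs : PySem.Dict (List Int) Int :=
    (PySem.List.pyRange 0 ((music.length : Int) - length) 1).foldl
      (fun d i =>
        let t := PySem.List.slice music (some i) (some (i + length))
        PySem.Dict.insert d t (PySem.Dict.getD d t 0 + 1))
      PySem.Dict.empty
  all_freqs.items

-- ===== PRECONDITION & SPEC =====
def Spec_get_sequence_frequencies (music : List Int) (length : Int) (out : List (List Int × Int)) : Prop := out = get_sequence_frequencies_alt music length
instance (music : List Int) (length : Int) (out : List (List Int × Int)) : Decidable (Spec_get_sequence_frequencies music length out) := by unfold Spec_get_sequence_frequencies; infer_instance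

-- ===== CLAIM (what is proved, stated in full; the proofs are below) =====
def Claim_equal_get_sequence_frequencies : Prop := ∀ (music : List Int) (length : Int), Dom_get_sequence_frequencies music length → Spec_get_sequence_frequencies music length (get_sequence_frequencies music length)

-- ===== LEMMAS AND PROOFS =====

-- repeated 'd[k] += 1' on a key just inserted yields the insert of the final count
theorem pv_foldl_modify_const {κ : Type} [BEq κ] [LawfulBEq κ] (l : List κ) (d : PySem.Dict κ Int)
    (k : κ) (m : Int) :
    l.foldl (fun d _ => PySem.Dict.modify d k 0 (· + 1)) (PySem.Dict.insert d k m)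
      = PySem.Dict.insert d k (m + l.length) := by
  induction l generalizing m with
  | nil => simp
  | cons x t ih =>
    simp only [List.foldl_cons]
    have : PySem.Dict.modify (PySem.Dict.insert d k m) k 0 (· + 1)
        = PySem.Dict.insert d k (m + 1) := by
      simp [PySem.Dict.modify, PySem.Dict.getD_insert_self, PySem.Dict.insert_insert_self]
    rw [this, ih]
    congr 1
    simp only [List.length_cons]
    push_cast
    omega

-- A's second phase, expressed over an arbitrary window list ws, inserts each distinct
-- window with its count.
theorem pv_phaseA (ws : List (List Int)) :
    (PySem.Set.ofList ws).foldl
      (fun d seq =>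
        ws.foldl (fun d w => if seq == w then PySem.Dict.modify d seq 0 (· + 1) else d)
          (PySem.Dict.insert d seq 0))
      PySem.Dict.empty
    = PySem.Dict.counter ws := by
  have body : ∀ (d : PySem.Dict (List Int) Int) (seq : List Int),
      ws.foldl (fun d w => if seq == w then PySem.Dict.modify d seq 0 (· + 1) else d)
        (PySem.Dict.insert d seq 0)
      = PySem.Dict.insert d seq ((ws.count seq : Int)) := by
    intro d seq
    rw [PySem.List.foldl_if_eq_foldl_filter (p := fun w => seq == w)]
    have hlen : (ws.filter (fun w => seq == w)).length = ws.count seq := by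
      rw [List.count_eq_countP, List.countP_eq_length_filter]
      exact congrArg List.length (List.filter_congr (fun w _ => by simp [eq_comm]))
    rw [pv_foldl_modify_const, hlen]; simp
  calc (PySem.Set.ofList ws).foldl
        (fun d seq =>
          ws.foldl (fun d w => if seq == w then PySem.Dict.modify d seq 0 (· + 1) else d)
            (PySem.Dict.insert d seq 0)) PySem.Dict.empty
      = (PySem.Set.ofList ws).foldl
          (fun d seq => PySem.Dict.insert d seq ((ws.count seq : Int))) PySem.Dict.empty := by
        apply PySem.List.foldl_congr_mem; intro d seq _; exact body d seq
    _ = PySem.Dict.counter ws := by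
        apply PySem.Dict.ext
        have hfresh := PySem.Dict.items_foldl_insert_fresh (l := PySem.Set.ofList ws)
          (k := fun s => s) (v := fun seq => ((ws.count seq : Int)))
          (d := PySem.Dict.empty) (fun a _ => by simp)
          (by simp)
        simp only [] at hfresh
        rw [hfresh, PySem.Dict.items_counter]
        rfl

-- ===== VERDICT (by name: the statement is the Claim_ definition above) =====
theorem get_sequence_frequencies_spec : Claim_equal_get_sequence_frequencies := by
  intro music length _
  unfold Spec_get_sequence_frequencies get_sequence_frequencies get_sequence_frequencies_alt
  simp only []
  set ws : List (List Int) :=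
    (PySem.List.pyRange 0 ((music.length : Int) - length) 1).map
      (fun i => PySem.List.slice music (some i) (some (i + length))) with hws
  have hset : (PySem.List.pyRange 0 ((music.length : Int) - length) 1).foldl
      (fun s i => PySem.Set.add s (PySem.List.slice music (some i) (some (i + length))))
      PySem.Set.empty = PySem.Set.ofList ws := by
    rw [hws, PySem.Set.ofList_eq_foldl, List.foldl_map]; rfl
  rw [hset]
  refine congrArg PySem.Dict.items ?_
  calc (PySem.Set.ofList ws).foldl
        (fun d seq =>
          (PySem.List.pyRange 0 ((music.length : Int) - length) 1).foldl
            (fun d i => if seq == PySem.List.slice music (some i) (some (i + length)) then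
                PySem.Dict.modify d seq 0 (· + 1) else d)
            (PySem.Dict.insert d seq 0)) PySem.Dict.empty
      = (PySem.Set.ofList ws).foldl
          (fun d seq =>
            ws.foldl (fun d w => if seq == w then PySem.Dict.modify d seq 0 (· + 1) else d)
              (PySem.Dict.insert d seq 0)) PySem.Dict.empty := by
        apply PySem.List.foldl_congr_mem
        intro d seq _
        rw [hws, List.foldl_map]
    _ = PySem.Dict.counter ws := pv_phaseA ws
    _ = (PySem.List.pyRange 0 ((music.length : Int) - length) 1).foldl
          (fun d i =>
            let t := PySem.List.slice music (some i) (some (i + length))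
            PySem.Dict.insert d t (PySem.Dict.getD d t 0 + 1)) PySem.Dict.empty := by
        rw [← PySem.Dict.foldl_insert_getD_add_one_eq_counter, hws, List.foldl_map]
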